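-- pv_equiv track=rewrite | github.com/YIDEUNKIM/qubo_dataset | qubo_zero_expectation.py | solve_brute_force
-- ===== SOURCE A (Python) =====
-- import itertools
--
-- def calculate_energy(x, Q):
--     """에너지 계산"""
--     energy = 0
--     x_vec = [int(bit) for bit in x]
--
--     for (i, j), weight in Q.items():
--         if i == j:
--             energy += weight * x_vec[i]
--         else:
--             energy += weight * x_vec[i] * x_vec[j]
--
--     return energy
--
-- def solve_brute_force(Q, n):
--     """브루트포스 풀이"""
--     if n > 20:
--         return None, None, None
--
--     best_energy = float('inf')
--     best_solution = None
--     all_results = []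
--
--     for bits in itertools.product([0, 1], repeat=n):
--         current_state = "".join(map(str, bits))
--         energy = calculate_energy(current_state, Q)
--         all_results.append((current_state, energy))
--
--         if energy < best_energy:
--             best_energy = energy
--             best_solution = current_state
--
--     return best_solution, best_energy, all_results
-- ===== SOURCE B (Python) =====
-- def solve_brute_force(Q, n):
--     """브루트포스 풀이 (incremental: energy(k) = energy(k without its top bit) + local delta)"""
--     if n > 20:
--         return None, None, None
--
--     size = 1 << n
--     diag = [0] * n
--     adj = [[] for _ in range(n)]
--     for (i, j), w in Q.items():
--         if i == j:
--             diag[i] += w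
--         else:
--             adj[i].append((j, w))
--             adj[j].append((i, w))
--
--     # energies[k]: bit (n-1-v) of k is the value of variable v (so k counts in
--     # the same order as itertools.product).  For k > 0 let p be its highest set
--     # bit (variable v = n-1-p, the lowest-numbered variable set in k): removing
--     # it gives a smaller state, and the delta is v's diagonal weight plus the
--     # couplings of v to the variables still set in k (all have index > v).
--     energies = [0] * size
--     for k in range(1, size):
--         p = k.bit_length() - 1
--         v = n - 1 - p
--         e = energies[k - (1 << p)] + diag[v]
--         for (u, w) in adj[v]:
--             if (k >> (n - 1 - u)) & 1:
--                 e += w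
--         energies[k] = e
--
--     best_k = 0
--     for k in range(1, size):
--         if energies[k] < energies[best_k]:
--             best_k = k
--
--     def bitstring(k):
--         return "".join("1" if (k >> (n - 1 - i)) & 1 else "0" for i in range(n))
--
--     all_results = [(bitstring(k), energies[k]) for k in range(size)]
--     return bitstring(best_k), energies[best_k], all_results
-- ===== Notes on version B (the rewrite author's own statement) =====
-- stated objective: faster
-- what changed: Instead of re-evaluating the full QUBO sum over all items for each of the 2^n bitstrings, B computes each state's energy incrementally from the state with its top bit removed (adding only the flipped variable's diagonal weight and its couplings to the still-set variables, via precomputed per-variable adjacency lists), then takes the first argmin.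
-- outside the precondition, e.g. on solve_brute_force({(2, 0): 1}, 2): A raises IndexError, B raises IndexError
import Mathlib
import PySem

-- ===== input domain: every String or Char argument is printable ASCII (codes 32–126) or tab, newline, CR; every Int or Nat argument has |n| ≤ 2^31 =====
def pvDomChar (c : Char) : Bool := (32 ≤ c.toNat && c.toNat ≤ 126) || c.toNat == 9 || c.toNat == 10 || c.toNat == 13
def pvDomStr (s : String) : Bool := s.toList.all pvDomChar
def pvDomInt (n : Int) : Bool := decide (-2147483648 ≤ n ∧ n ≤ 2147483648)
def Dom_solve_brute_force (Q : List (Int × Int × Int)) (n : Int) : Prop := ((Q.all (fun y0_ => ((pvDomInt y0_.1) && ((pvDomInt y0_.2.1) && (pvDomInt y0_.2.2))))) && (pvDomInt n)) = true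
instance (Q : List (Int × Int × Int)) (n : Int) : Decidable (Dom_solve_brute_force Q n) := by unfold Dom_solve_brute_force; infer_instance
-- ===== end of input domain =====

-- B replaces A's full O(|Q|) energy re-evaluation per bitstring by an incremental
-- computation (energy of k = energy of k with its top bit removed + the flipped
-- variable's local contribution from precomputed adjacency lists).

-- Both Pythons receive Q as a dict keyed by (i, j); the triple list encodes that
-- dict in insertion order (later duplicate keys overwrite in place), so both ports
-- decode it the same way before running their own algorithm.
def pvItems (Q : List (Int × Int × Int)) : List ((Int × Int) × Int) :=
  (Q.foldl (fun d t => d.insert (t.1, t.2.1) t.2.2)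
    (PySem.Dict.empty : PySem.Dict (Int × Int) Int)).items

-- ===== PORT A =====

-- int(bit) on a one-character string (here always '0'/'1')
def pvIntOfBit (c : Char) : Int := (PySem.Int.ofStr? (String.mk [c])).getD 0

-- x_vec[i]: Python raises IndexError out of range; `.getD 0` is only reached
-- outside Pre_solve_brute_force, which requires every index in [0, n).
def calculate_energy (x : String) (items : List ((Int × Int) × Int)) : Int :=
  let x_vec := x.toList.map pvIntOfBit
  items.foldl (fun energy p =>
    if p.1.1 = p.1.2 then
      energy + p.2 * ((PySem.List.pyGet? x_vec p.1.1).getD 0)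
    else
      energy + p.2 * ((PySem.List.pyGet? x_vec p.1.1).getD 0)
               * ((PySem.List.pyGet? x_vec p.1.2).getD 0)) 0

-- itertools.product([0, 1], repeat=m) (first coordinate varies slowest)
def pvProd : Nat → List (List Int)
  | 0 => [[]]
  | m + 1 => ((pvProd m).map (fun t => 0 :: t)) ++ ((pvProd m).map (fun t => 1 :: t))

-- "".join(map(str, bits))
def pvJoinBits (bits : List Int) : String := PySem.Str.join "" (bits.map PySem.Int.toStr)

-- loop body: all_results.append((state, energy)); best update (best_energy starts
-- at float('inf'), ported as `none`, so the first iteration always updates)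
def pvStepA (items : List ((Int × Int) × Int))
    (st : Option String × Option Int × List (String × Int)) (bits : List Int) :
    Option String × Option Int × List (String × Int) :=
  let s := pvJoinBits bits
  let e := calculate_energy s items
  let res := st.2.2 ++ [(s, e)]
  match st.2.1 with
  | none => (some s, some e, res)
  | some b => if e < b then (some s, some e, res) else (st.1, some b, res)

def solve_brute_force (Q : List (Int × Int × Int)) (n : Int) :
    Option String × Option Int × (Option (List (String × Int))) :=
  if 20 < n then (none, none, none)
  else
    let items := pvItems Q
    let r := (pvProd n.toNat).foldl (pvStepA items) (none, none, [])
    (r.1, r.2.1, some r.2.2)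

-- ===== PORT B =====

-- Python B's diag / adj are lists indexed 0..n-1; ported as maps var ↦ value
-- (exact under Pre_solve_brute_force, where every index is in [0, n)).
def pvDiag (items : List ((Int × Int) × Int)) : Int → Int :=
  items.foldl (fun d p =>
    if p.1.1 = p.1.2 then (fun t => if t = p.1.1 then d t + p.2 else d t) else d)
    (fun _ => 0)

def pvAdj (items : List ((Int × Int) × Int)) : Int → List (Int × Int) :=
  items.foldl (fun a p =>
    if p.1.1 = p.1.2 then a
    else
      let a1 := fun t => if t = p.1.1 then a t ++ [(p.1.2, p.2)] else a t
      fun t => if t = p.1.2 then a1 t ++ [(p.1.1, p.2)] else a1 t)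
    (fun _ => [])

-- energies[k] computed by the recurrence (memoised in Python, recomputed here:
-- the chain k ↦ k - 2^(bit_length-1) has length ≤ popcount k)
def pvEnergyB (diag : Int → Int) (adj : Int → List (Int × Int)) (m : Nat) (k : Nat) : Int :=
  if h : k = 0 then 0
  else
    let p := Nat.log2 k          -- k.bit_length() - 1
    let v : Int := (m : Int) - 1 - (p : Int)
    let e := pvEnergyB diag adj m (k - 2 ^ p) + diag v
    (adj v).foldl (fun acc uw =>
      if (k >>> ((m : Int) - 1 - uw.1).toNat) &&& 1 = 1 then acc + uw.2 else acc) e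
termination_by k
decreasing_by
  have h1 : 2 ^ Nat.log2 k ≤ k := Nat.log2_self_le h
  have h2 : 0 < 2 ^ Nat.log2 k := Nat.two_pow_pos _
  omega

-- "".join("1" if (k >> (n-1-i)) & 1 else "0" for i in range(n))
def pvBitstr (m k : Nat) : String :=
  PySem.Str.join "" ((List.range m).map (fun i =>
    if (k >>> (m - 1 - i)) &&& 1 = 1 then "1" else "0"))

def solve_brute_force_alt (Q : List (Int × Int × Int)) (n : Int) :
    Option String × Option Int × (Option (List (String × Int))) :=
  if 20 < n then (none, none, none)
  else
    let items := pvItems Q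
    let m := n.toNat
    let size := 2 ^ m
    let diag := pvDiag items
    let adj := pvAdj items
    let energies := (List.range size).map (pvEnergyB diag adj m)
    -- for k in range(1, size): best_k = k if energies[k] < energies[best_k] else best_k
    let best_k := (List.range' 1 (size - 1)).foldl
      (fun bk k => if energies.getD k 0 < energies.getD bk 0 then k else bk) 0
    let all := (List.range size).map (fun k => (pvBitstr m k, energies.getD k 0))
    (some (pvBitstr m best_k), some (energies.getD best_k 0), some all)

-- ===== PRECONDITION & SPEC =====
-- Pre_ keeps n ≥ 0 and (when the search actually runs, i.e. n ≤ 20) every Q index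
-- in [0, n): outside it A raises (ValueError for n < 0, IndexError for an index
-- ≥ n or < -n) — except that for indices in [-n, -1] A returns an accidental
-- energy via Python's negative-index wraparound; such malformed QUBO input is
-- outside the natural domain and excluded (B can differ there).
def Pre_solve_brute_force (Q : List (Int × Int × Int)) (n : Int) : Prop :=
  0 ≤ n ∧ (20 < n ∨ ∀ t ∈ Q, 0 ≤ t.1 ∧ t.1 < n ∧ 0 ≤ t.2.1 ∧ t.2.1 < n)
instance (Q : List (Int × Int × Int)) (n : Int) : Decidable (Pre_solve_brute_force Q n) := by
  unfold Pre_solve_brute_force; infer_instance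

def pvWitness_solve_brute_force : (List (Int × Int × Int)) × Int :=
  ([((0 : Int), (0 : Int), (-1 : Int)), ((0 : Int), (1 : Int), (3 : Int))], (2 : Int))

def Spec_solve_brute_force (Q : List (Int × Int × Int)) (n : Int)
    (out : Option String × Option Int × (Option (List (String × Int)))) : Prop :=
  out = solve_brute_force_alt Q n
instance (Q : List (Int × Int × Int)) (n : Int)
    (out : Option String × Option Int × (Option (List (String × Int)))) :
    Decidable (Spec_solve_brute_force Q n out) := by
  unfold Spec_solve_brute_force; infer_instance

-- ===== CLAIM (what is proved, stated in full; the proofs are below) =====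
def Claim_equal_solve_brute_force : Prop := ∀ (Q : List (Int × Int × Int)) (n : Int), Dom_solve_brute_force Q n → Pre_solve_brute_force Q n → Spec_solve_brute_force Q n (solve_brute_force Q n)

-- ===== LEMMAS AND PROOFS =====

-- the value of variable u (bit position m-1-u) in state k
def pvBit (m k : Nat) (u : Int) : Int :=
  if k.testBit (m - 1 - u.toNat) then 1 else 0

-- reference energy: the QUBO sum evaluated directly on state k
def pvTerm (m k : Nat) (p : (Int × Int) × Int) : Int :=
  if p.1.1 = p.1.2 then p.2 * pvBit m k p.1.1
  else p.2 * pvBit m k p.1.1 * pvBit m k p.1.2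

def pvED (m k : Nat) (items : List ((Int × Int) × Int)) : Int :=
  (items.map (pvTerm m k)).sum

-- bits of state k in variable order (itertools.product element no. k)
def pvBitsL (m k : Nat) : List Int :=
  (List.range m).map (fun i => if k.testBit (m - 1 - i) then (1 : Int) else 0)

def pvInRange (m : Nat) (items : List ((Int × Int) × Int)) : Prop :=
  ∀ p ∈ items, 0 ≤ p.1.1 ∧ p.1.1 < (m : Int) ∧ 0 ≤ p.1.2 ∧ p.1.2 < (m : Int)

theorem pv_shift_eq_testBit (k s : Nat) : ((k >>> s) &&& 1 = 1) ↔ k.testBit s := by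
  simp [Nat.testBit, Nat.and_one_is_mod]

theorem pvItems_key_mem (Q : List (Int × Int × Int)) (P : Int × Int → Prop)
    (d : PySem.Dict (Int × Int) Int) (hd : ∀ p ∈ d.items, P p.1)
    (hQ : ∀ t ∈ Q, P (t.1, t.2.1)) :
    ∀ p ∈ (Q.foldl (fun d t => d.insert (t.1, t.2.1) t.2.2) d).items, P p.1 := by
  induction Q generalizing d with
  | nil => exact hd
  | cons t Q ih =>
    simp only [List.foldl_cons]
    refine ih _ ?_ (fun u hu => hQ u (List.mem_cons_of_mem _ hu))
    intro p hp
    rcases (PySem.Dict.mem_items_insert _ _ _ _).1 hp with h1 | h2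
    · subst h1; exact hQ t (List.mem_cons_self ..)
    · exact hd p h2.1

theorem pvItems_inRange (Q : List (Int × Int × Int)) (n : Int)
    (h : ∀ t ∈ Q, 0 ≤ t.1 ∧ t.1 < n ∧ 0 ≤ t.2.1 ∧ t.2.1 < n) (hn : 0 ≤ n) :
    pvInRange n.toNat (pvItems Q) := by
  intro p hp
  have := pvItems_key_mem Q
    (fun key => 0 ≤ key.1 ∧ key.1 < n ∧ 0 ≤ key.2 ∧ key.2 < n)
    PySem.Dict.empty (by simp [PySem.Dict.empty]) (by
      intro t ht
      exact h t ht) p hp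
  have h2n : ((n.toNat : Nat) : Int) = n := Int.toNat_of_nonneg hn
  refine ⟨this.1, ?_, this.2.2.1, ?_⟩ <;> omega

theorem pvBitsL_succ_lo (m k : Nat) (hk : k < 2 ^ m) :
    pvBitsL (m + 1) k = 0 :: pvBitsL m k := by
  simp only [pvBitsL, List.range_succ_eq_map, List.map_cons, List.map_map]
  have hb : k.testBit m = false := by simpa using Nat.testBit_lt_two_pow hk
  refine List.cons_eq_cons.2 ⟨by simp [hb], ?_⟩
  apply List.map_congr_left
  intro i _
  have : m - (i + 1) = m - 1 - i := by omega
  simp [Function.comp, this]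

theorem pvBitsL_succ_hi (m k : Nat) (hk : k < 2 ^ m) :
    pvBitsL (m + 1) (2 ^ m + k) = 1 :: pvBitsL m k := by
  simp only [pvBitsL, List.range_succ_eq_map, List.map_cons, List.map_map]
  have hb : (2 ^ m + k).testBit m = true := by
    rw [Nat.testBit_two_pow_add_eq]
    simpa using Nat.testBit_lt_two_pow hk
  refine List.cons_eq_cons.2 ⟨by simp [hb], ?_⟩
  apply List.map_congr_left
  intro i hi
  have heq : m + 1 - 1 - i.succ = m - 1 - i := by omega
  simp only [Function.comp, heq]
  have hlt : m - 1 - i < m := by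
    simp only [List.mem_range] at hi; omega
  rw [Nat.testBit_two_pow_add_gt hlt]

theorem pvProd_eq (m : Nat) : pvProd m = (List.range (2 ^ m)).map (pvBitsL m) := by
  induction m with
  | zero => simp [pvProd, pvBitsL]
  | succ m ih =>
    have h2 : 2 ^ (m + 1) = 2 ^ m + 2 ^ m := by ring
    rw [pvProd, ih, h2, List.range_add, List.map_append, List.map_map, List.map_map]
    congr 1
    · apply List.map_congr_left
      intro k hk
      simp only [List.mem_range] at hk
      simp [Function.comp, pvBitsL_succ_lo m k hk]
    · rw [List.map_map]
      apply List.map_congr_left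
      intro k hk
      simp only [List.mem_range] at hk
      simp [Function.comp, pvBitsL_succ_hi m k hk]

theorem pvJoin_eq (m k : Nat) : pvJoinBits (pvBitsL m k) = pvBitstr m k := by
  simp only [pvJoinBits, pvBitsL, pvBitstr, List.map_map]
  congr 1
  apply List.map_congr_left
  intro i _
  have h1 : PySem.Int.toStr 1 = "1" := by decide
  have h0 : PySem.Int.toStr 0 = "0" := by decide
  by_cases h : k.testBit (m - 1 - i)
  · have hs : ((k >>> (m - 1 - i)) &&& 1 = 1) := (pv_shift_eq_testBit k _).2 h
    simp [Function.comp, h, hs, h1]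
  · have hm : k >>> (m - 1 - i) % 2 ≠ 1 := by
      rw [← Nat.and_one_is_mod]
      exact fun hc => h ((pv_shift_eq_testBit k _).1 hc)
    simp [Function.comp, h, hm, h0]

theorem pvBitstr_toList (m k : Nat) :
    (pvBitstr m k).toList
      = (List.range m).map (fun i => if k.testBit (m - 1 - i) then '1' else '0') := by
  simp only [pvBitstr]
  rw [PySem.Str.toList_join]
  have : (List.map String.toList
      ((List.range m).map (fun i => if (k >>> (m - 1 - i)) &&& 1 = 1 then "1" else "0")))
      = ((List.range m).map (fun i => if k.testBit (m - 1 - i) then '1' else '0')).map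
          (fun c => [c]) := by
    simp only [List.map_map]
    apply List.map_congr_left
    intro i _
    by_cases h : k.testBit (m - 1 - i)
    · have hs : ((k >>> (m - 1 - i)) &&& 1 = 1) := (pv_shift_eq_testBit k _).2 h
      simp [Function.comp, h, hs]
    · have hm : k >>> (m - 1 - i) % 2 ≠ 1 := by
        rw [← Nat.and_one_is_mod]
        exact fun hc => h ((pv_shift_eq_testBit k _).1 hc)
      simp [Function.comp, h, hm]
  rw [this]
  have : ("" : String).toList = ([] : List Char) := by decide
  rw [this, PySem.Chars.join_nil_singletons]

theorem pvBitsL_get (m k : Nat) (u : Int) (h0 : 0 ≤ u) (h1 : u < (m : Int)) :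
    (PySem.List.pyGet? (pvBitsL m k) u).getD 0 = pvBit m k u := by
  have hlen : (pvBitsL m k).length = m := by simp [pvBitsL]
  have h1' : u < ((pvBitsL m k).length : Int) := by rw [hlen]; exact_mod_cast h1
  rw [PySem.List.pyGet?_eq_some_getElem _ h0 h1']
  have hu : u.toNat < m := by omega
  simp [pvBitsL, pvBit]

theorem pvCalc_eq (m k : Nat) (items : List ((Int × Int) × Int))
    (hR : pvInRange m items) :
    calculate_energy (pvJoinBits (pvBitsL m k)) items = pvED m k items := by
  have hv1 : pvIntOfBit '1' = 1 := by decide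
  have hv0 : pvIntOfBit '0' = 0 := by decide
  have hx : (pvJoinBits (pvBitsL m k)).toList.map pvIntOfBit = pvBitsL m k := by
    rw [pvJoin_eq, pvBitstr_toList, List.map_map]
    simp only [pvBitsL]
    apply List.map_congr_left
    intro i _
    by_cases h : k.testBit (m - 1 - i) <;> simp [Function.comp, h, hv1, hv0]
  simp only [calculate_energy]
  rw [hx]
  rw [PySem.List.foldl_congr_mem items _ (fun e p => e + pvTerm m k p) 0 ?_]
  · rw [PySem.List.foldl_add items (pvTerm m k) 0, pvED]
    ring
  · intro acc p hp
    rcases hR p hp with ⟨hi0, hi1, hj0, hj1⟩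
    rw [pvBitsL_get m k p.1.1 hi0 hi1, pvBitsL_get m k p.1.2 hj0 hj1]
    simp only [pvTerm]
    split <;> ring

-- characterisation of the diag-building fold
theorem pvDiag_spec (L : List ((Int × Int) × Int)) (d : Int → Int) (t : Int) :
    (L.foldl (fun d p =>
      if p.1.1 = p.1.2 then (fun s => if s = p.1.1 then d s + p.2 else d s) else d) d) t
    = d t + (L.map (fun p => if p.1.1 = p.1.2 ∧ t = p.1.1 then p.2 else 0)).sum := by
  induction L generalizing d with
  | nil => simp
  | cons p L ih =>
    simp only [List.foldl_cons, List.map_cons, List.sum_cons, ih]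
    by_cases h1 : p.1.1 = p.1.2
    · by_cases h2 : t = p.1.1
      · have h3 : t = p.1.2 := h2.trans h1
        simp only [h1, h2, if_true, and_self]
        ring
      · have h3 : ¬ t = p.1.2 := by rw [← h1]; exact h2
        simp [h1, h3]
    · simp [h1]

-- the adjacency entries a single item contributes at index t
def pvAdjSpec (t : Int) (p : (Int × Int) × Int) : List (Int × Int) :=
  if p.1.1 = p.1.2 then []
  else (if t = p.1.1 then [(p.1.2, p.2)] else []) ++ (if t = p.1.2 then [(p.1.1, p.2)] else [])

theorem pvAdj_spec (L : List ((Int × Int) × Int)) (a : Int → List (Int × Int)) (t : Int) :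
    (L.foldl (fun a p =>
      if p.1.1 = p.1.2 then a
      else
        let a1 := fun s => if s = p.1.1 then a s ++ [(p.1.2, p.2)] else a s
        fun s => if s = p.1.2 then a1 s ++ [(p.1.1, p.2)] else a1 s) a) t
    = a t ++ L.flatMap (pvAdjSpec t) := by
  induction L generalizing a with
  | nil => simp
  | cons p L ih =>
    simp only [List.foldl_cons, List.flatMap_cons, ih, pvAdjSpec]
    by_cases h1 : p.1.1 = p.1.2
    · simp [h1]
    · have h1' : ¬ p.1.2 = p.1.1 := fun hc => h1 hc.symm
      by_cases h2 : t = p.1.1 <;> by_cases h3 : t = p.1.2 <;>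
        simp_all [List.append_assoc]

theorem pv_sum_map_flatMap {α β : Type} (L : List α) (f : α → List β) (g : β → Int) :
    ((L.flatMap f).map g).sum = (L.map (fun p => ((f p).map g).sum)).sum := by
  induction L with
  | nil => simp
  | cons p L ih => simp [List.flatMap_cons, ih]

theorem pvFoldlIfAdd (l : List (Int × Int)) (C : Int × Int → Prop) [DecidablePred C] (e : Int) :
    l.foldl (fun acc uw => if C uw then acc + uw.2 else acc) e
      = e + (l.map (fun uw => if C uw then uw.2 else 0)).sum := by
  rw [PySem.List.foldl_congr_mem l _ (fun acc uw => acc + if C uw then uw.2 else 0) e ?_]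
  · exact PySem.List.foldl_add l _ e
  · intro acc uw _
    by_cases h : C uw <;> simp [h]

-- bit facts for removing the top set bit of k
theorem pv_testBit_of_ne (k q : Nat) (hk0 : k ≠ 0) (hq : q ≠ k.log2) :
    (k - 2 ^ k.log2).testBit q = k.testBit q := by
  have hle : 2 ^ k.log2 ≤ k := Nat.log2_self_le hk0
  have hlt : k < 2 ^ (k.log2 + 1) := Nat.lt_log2_self
  have hr : k - 2 ^ k.log2 < 2 ^ k.log2 := by
    have : 2 ^ (k.log2 + 1) = 2 ^ k.log2 + 2 ^ k.log2 := by ring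
    omega
  have hk2 : k = 2 ^ k.log2 + (k - 2 ^ k.log2) := by omega
  rcases Nat.lt_or_ge q k.log2 with h | h
  · conv_rhs => rw [hk2]
    rw [Nat.testBit_two_pow_add_gt h]
  · have hq' : k.log2 < q := by omega
    have h1 : (k - 2 ^ k.log2).testBit q = false := by
      apply Nat.testBit_lt_two_pow
      calc k - 2 ^ k.log2 < 2 ^ k.log2 := hr
        _ ≤ 2 ^ q := Nat.pow_le_pow_right (by norm_num) (by omega)
    have h2 : k.testBit q = false := by
      apply Nat.testBit_lt_two_pow
      calc k < 2 ^ (k.log2 + 1) := hlt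
        _ ≤ 2 ^ q := Nat.pow_le_pow_right (by norm_num) (by omega)
    rw [h1, h2]

theorem pv_testBit_top (k : Nat) (hk0 : k ≠ 0) : k.testBit k.log2 = true := by
  have hle : 2 ^ k.log2 ≤ k := Nat.log2_self_le hk0
  have hlt : k < 2 ^ (k.log2 + 1) := Nat.lt_log2_self
  have hr : k - 2 ^ k.log2 < 2 ^ k.log2 := by
    have : 2 ^ (k.log2 + 1) = 2 ^ k.log2 + 2 ^ k.log2 := by ring
    omega
  have hk2 : k = 2 ^ k.log2 + (k - 2 ^ k.log2) := by omega
  have h := Nat.testBit_two_pow_add_eq (k - 2 ^ k.log2) (k.log2)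
  rw [← hk2] at h
  rw [h]
  simpa using Nat.testBit_lt_two_pow hr

theorem pv_testBit_sub_top (k : Nat) (hk0 : k ≠ 0) :
    (k - 2 ^ k.log2).testBit k.log2 = false := by
  have hle : 2 ^ k.log2 ≤ k := Nat.log2_self_le hk0
  have hlt : k < 2 ^ (k.log2 + 1) := Nat.lt_log2_self
  apply Nat.testBit_lt_two_pow
  have : 2 ^ (k.log2 + 1) = 2 ^ k.log2 + 2 ^ k.log2 := by ring
  omega

-- if-sum as a product with the 0/1 bit
theorem pv_if_bit (m k : Nat) (u : Int) (w : Int) (h0 : 0 ≤ u) (h1 : u < (m : Int)) :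
    (if (k >>> ((m : Int) - 1 - u).toNat) &&& 1 = 1 then w else 0) = w * pvBit m k u := by
  have hcast : ((m : Int) - 1 - u).toNat = m - 1 - u.toNat := by omega
  rw [hcast]
  by_cases h : k.testBit (m - 1 - u.toNat)
  · have hs := (pv_shift_eq_testBit k (m - 1 - u.toNat)).2 h
    simp [hs, pvBit, h]
  · have hm : k >>> (m - 1 - u.toNat) % 2 ≠ 1 := by
      rw [← Nat.and_one_is_mod]
      exact fun hc => h ((pv_shift_eq_testBit k _).1 hc)
    simp [hm, pvBit, h]

theorem pvED_step (m : Nat) (items : List ((Int × Int) × Int)) (hR : pvInRange m items)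
    (k : Nat) (hk0 : k ≠ 0) (hkm : k < 2 ^ m) :
    pvED m k items
      = pvED m (k - 2 ^ k.log2) items
        + pvDiag items ((m : Int) - 1 - (k.log2 : Int))
        + (items.flatMap (pvAdjSpec ((m : Int) - 1 - (k.log2 : Int)))).foldl
            (fun acc uw =>
              if (k >>> ((m : Int) - 1 - uw.1).toNat) &&& 1 = 1 then acc + uw.2 else acc) 0 := by
  have hPm : k.log2 < m := (Nat.log2_lt hk0).2 hkm
  have hv0 : 0 ≤ (m : Int) - 1 - (k.log2 : Int) := by omega
  have hv1 : (m : Int) - 1 - (k.log2 : Int) < (m : Int) := by omega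
  have hvpos : m - 1 - ((m : Int) - 1 - (k.log2 : Int)).toNat = k.log2 := by omega
  -- adjacency entries at v all have in-range partner index
  -- the inner fold as a sum
  rw [pvFoldlIfAdd]
  -- bits of r agree with bits of k away from v
  have hbit_ne : ∀ u : Int, 0 ≤ u → u < (m : Int) → u ≠ (m : Int) - 1 - (k.log2 : Int) →
      pvBit m (k - 2 ^ k.log2) u = pvBit m k u := by
    intro u h0 h1 hne
    have hpos : m - 1 - u.toNat ≠ k.log2 := by omega
    simp only [pvBit, pv_testBit_of_ne k _ hk0 hpos]
  have hbit_k_v : pvBit m k ((m : Int) - 1 - (k.log2 : Int)) = 1 := by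
    simp only [pvBit, hvpos, pv_testBit_top k hk0, if_true]
  have hbit_r_v : pvBit m (k - 2 ^ k.log2) ((m : Int) - 1 - (k.log2 : Int)) = 0 := by
    simp only [pvBit, hvpos, pv_testBit_sub_top k hk0]
    simp
  -- pointwise over items
  have hpt : ∀ p ∈ items,
      pvTerm m k p
        = pvTerm m (k - 2 ^ k.log2) p
          + (if p.1.1 = p.1.2 ∧ (m : Int) - 1 - (k.log2 : Int) = p.1.1 then p.2 else 0)
          + ((pvAdjSpec ((m : Int) - 1 - (k.log2 : Int)) p).map
              (fun uw => if (k >>> ((m : Int) - 1 - uw.1).toNat) &&& 1 = 1 then uw.2 else 0)).sum := by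
    intro p hp
    rcases hR p hp with ⟨hi0, hi1, hj0, hj1⟩
    by_cases h1 : p.1.1 = p.1.2
    · simp only [pvTerm, pvAdjSpec, if_pos h1, List.map_nil, List.sum_nil, add_zero]
      by_cases h2 : (m : Int) - 1 - (k.log2 : Int) = p.1.1
      · have hb1 : pvBit m k p.1.1 = 1 := by rw [← h2]; exact hbit_k_v
        have hb1' : pvBit m (k - 2 ^ k.log2) p.1.1 = 0 := by rw [← h2]; exact hbit_r_v
        rw [hb1, hb1', if_pos ⟨h1, h2⟩]
        ring
      · rw [hbit_ne p.1.1 hi0 hi1 (fun hc => h2 hc.symm),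
           if_neg (fun hc : _ ∧ _ => h2 hc.2)]
        ring
    · have hd : ¬ (p.1.1 = p.1.2 ∧ (m : Int) - 1 - (k.log2 : Int) = p.1.1) := fun hc => h1 hc.1
      simp only [pvTerm, pvAdjSpec, if_neg h1, if_neg hd]
      by_cases h2 : (m : Int) - 1 - (k.log2 : Int) = p.1.1
      · have h3 : ¬ (m : Int) - 1 - (k.log2 : Int) = p.1.2 := fun hc => h1 (h2.symm.trans hc)
        have hb1 : pvBit m k p.1.1 = 1 := by rw [← h2]; exact hbit_k_v
        have hb1' : pvBit m (k - 2 ^ k.log2) p.1.1 = 0 := by rw [← h2]; exact hbit_r_v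
        rw [hb1, hb1']
        simp only [if_pos h2, if_neg h3, List.append_nil, List.map_cons, List.map_nil,
          List.sum_cons, List.sum_nil, add_zero]
        rw [pv_if_bit m k p.1.2 p.2 hj0 hj1]
        ring
      · by_cases h3 : (m : Int) - 1 - (k.log2 : Int) = p.1.2
        · have hb2 : pvBit m k p.1.2 = 1 := by rw [← h3]; exact hbit_k_v
          have hb2' : pvBit m (k - 2 ^ k.log2) p.1.2 = 0 := by rw [← h3]; exact hbit_r_v
          rw [hb2, hb2', hbit_ne p.1.1 hi0 hi1 (fun hc => h2 hc.symm)]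
          simp only [if_neg h2, if_pos h3, List.nil_append, List.map_cons, List.map_nil,
            List.sum_cons, List.sum_nil, add_zero]
          rw [pv_if_bit m k p.1.1 p.2 hi0 hi1]
          ring
        · rw [hbit_ne p.1.1 hi0 hi1 (fun hc => h2 hc.symm),
             hbit_ne p.1.2 hj0 hj1 (fun hc => h3 hc.symm)]
          simp only [if_neg h2, if_neg h3, List.append_nil, List.map_nil, List.sum_nil,
            add_zero]
  -- assemble the sums
  simp only [pvED]
  rw [List.map_congr_left hpt]
  rw [pvDiag, pvDiag_spec]
  rw [pv_sum_map_flatMap items (pvAdjSpec ((m : Int) - 1 - (k.log2 : Int)))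
      (fun uw => if (k >>> ((m : Int) - 1 - uw.1).toNat) &&& 1 = 1 then uw.2 else 0)]
  rw [PySem.List.sum_map_add_int, PySem.List.sum_map_add_int]
  ring

theorem pvED_zero (m : Nat) (items : List ((Int × Int) × Int)) : pvED m 0 items = 0 := by
  simp only [pvED]
  apply List.sum_eq_zero
  intro x hx
  rcases List.mem_map.1 hx with ⟨p, _, rfl⟩
  have hb : ∀ u : Int, pvBit m 0 u = 0 := by intro u; simp [pvBit]
  simp [pvTerm, hb]

theorem pvEnergyB_eq (m : Nat) (items : List ((Int × Int) × Int))
    (hR : pvInRange m items) (k : Nat) (hk : k < 2 ^ m) :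
    pvEnergyB (pvDiag items) (pvAdj items) m k = pvED m k items := by
  induction k using Nat.strong_induction_on with
  | _ k ih =>
    rw [pvEnergyB]
    by_cases h0 : k = 0
    · simp [h0, pvED_zero]
    · simp only [dif_neg h0]
      have hle : 2 ^ k.log2 ≤ k := Nat.log2_self_le h0
      have hlt : k - 2 ^ k.log2 < k := by
        have := Nat.two_pow_pos k.log2
        omega
      rw [ih (k - 2 ^ k.log2) hlt (by omega)]
      rw [pvED_step m items hR k h0 hk]
      rw [pvAdj, pvAdj_spec]
      simp only [List.nil_append]
      rw [pvFoldlIfAdd, pvFoldlIfAdd]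
      ring

-- running first-argmin over states 0..t-1 (0 is the initial candidate)
def pvArgm (m : Nat) (items : List ((Int × Int) × Int)) (t : Nat) : Nat :=
  (List.range' 1 (t - 1)).foldl
    (fun bk k => if pvED m k items < pvED m bk items then k else bk) 0

theorem pvArgm_succ (m : Nat) (items : List ((Int × Int) × Int)) (t : Nat) (ht : 1 ≤ t) :
    pvArgm m items (t + 1)
      = if pvED m t items < pvED m (pvArgm m items t) items then t else pvArgm m items t := by
  unfold pvArgm
  have h1 : t + 1 - 1 = (t - 1) + 1 := by omega
  rw [h1, List.range'_concat]
  have h2 : 1 + 1 * (t - 1) = t := by omega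
  rw [h2, List.foldl_append]
  simp

theorem pvArgm_lt (m : Nat) (items : List ((Int × Int) × Int)) (t : Nat) (ht : 1 ≤ t) :
    pvArgm m items t < t := by
  induction t with
  | zero => omega
  | succ t ih =>
    by_cases ht1 : t = 0
    · subst ht1
      simp [pvArgm]
    · rw [pvArgm_succ m items t (by omega)]
      have := ih (by omega)
      split <;> omega

-- A's loop over the first t product elements
theorem pvFoldA_eq (m : Nat) (items : List ((Int × Int) × Int)) (hR : pvInRange m items) :
    ∀ t, 1 ≤ t →
    ((List.range t).map (pvBitsL m)).foldl (pvStepA items) (none, none, [])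
      = (some (pvBitstr m (pvArgm m items t)), some (pvED m (pvArgm m items t) items),
         (List.range t).map (fun k => (pvBitstr m k, pvED m k items))) := by
  intro t ht
  induction t with
  | zero => omega
  | succ t ih =>
    by_cases ht1 : t = 0
    · subst ht1
      show (pvStepA items (none, none, []) (pvBitsL m 0)) = _
      simp only [pvStepA]
      rw [pvCalc_eq m 0 items hR, pvJoin_eq]
      simp [pvArgm]
    · have ht' : 1 ≤ t := by omega
      rw [List.range_succ, List.map_append, List.foldl_append, ih ht']
      simp only [List.map_cons, List.map_nil, List.foldl_cons, List.foldl_nil]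
      simp only [pvStepA]
      rw [pvCalc_eq m t items hR, pvJoin_eq]
      rw [pvArgm_succ m items t ht']
      by_cases hc : pvED m t items < pvED m (pvArgm m items t) items <;>
        simp [hc, List.map_append]

-- B's argmin loop, with the invariant that the candidate stays in range
theorem pvFoldB_eq (m : Nat) (items : List ((Int × Int) × Int)) (energies : List Int)
    (size : Nat)
    (hE : ∀ k, k < size → energies.getD k 0 = pvED m k items) :
    ∀ j, 1 + j ≤ size →
    (List.range' 1 j).foldl
        (fun bk k => if energies.getD k 0 < energies.getD bk 0 then k else bk) 0
      = pvArgm m items (j + 1) := by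
  intro j hj
  induction j with
  | zero => simp [pvArgm]
  | succ j ih =>
    rw [List.range'_concat, List.foldl_append, ih (by omega)]
    simp only [List.foldl_cons, List.foldl_nil]
    have hb : pvArgm m items (j + 1) < j + 1 := pvArgm_lt m items (j + 1) (by omega)
    have h2 : 1 + 1 * j = j + 1 := by omega
    rw [h2]
    rw [hE (j + 1) (by omega), hE (pvArgm m items (j + 1)) (by omega)]
    rw [pvArgm_succ m items (j + 1) (by omega)]

-- ===== VERDICT (by name: the statement is the Claim_ definition above) =====
theorem solve_brute_force_spec : Claim_equal_solve_brute_force := by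
  intro Q n hDom hPre
  rcases hPre with ⟨hn, hcase⟩
  unfold Spec_solve_brute_force
  by_cases h20 : 20 < n
  · simp [solve_brute_force, solve_brute_force_alt, h20]
  · have hrange : ∀ t ∈ Q, 0 ≤ t.1 ∧ t.1 < n ∧ 0 ≤ t.2.1 ∧ t.2.1 < n :=
      hcase.resolve_left h20
    have hR := pvItems_inRange Q n hrange hn
    simp only [solve_brute_force, solve_brute_force_alt, if_neg h20]
    have hsz : 1 ≤ 2 ^ n.toNat := Nat.one_le_two_pow
    -- B's energies list agrees with the reference energies
    have hE : ∀ k, k < 2 ^ n.toNat →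
        ((List.range (2 ^ n.toNat)).map
          (pvEnergyB (pvDiag (pvItems Q)) (pvAdj (pvItems Q)) n.toNat)).getD k 0
        = pvED n.toNat k (pvItems Q) := by
      intro k hk
      rw [List.getD_eq_getElem?_getD, List.getElem?_map, List.getElem?_range hk]
      simp [pvEnergyB_eq n.toNat (pvItems Q) hR k hk]
    have hbest : (List.range' 1 (2 ^ n.toNat - 1)).foldl
        (fun bk k =>
          if ((List.range (2 ^ n.toNat)).map
              (pvEnergyB (pvDiag (pvItems Q)) (pvAdj (pvItems Q)) n.toNat)).getD k 0
             < ((List.range (2 ^ n.toNat)).map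
              (pvEnergyB (pvDiag (pvItems Q)) (pvAdj (pvItems Q)) n.toNat)).getD bk 0
          then k else bk) 0
        = pvArgm n.toNat (pvItems Q) (2 ^ n.toNat) := by
      have h1 : 1 + (2 ^ n.toNat - 1) ≤ 2 ^ n.toNat := by omega
      have := pvFoldB_eq n.toNat (pvItems Q) _ (2 ^ n.toNat) hE (2 ^ n.toNat - 1) h1
      rw [this]
      congr 1
      omega
    rw [pvProd_eq n.toNat, pvFoldA_eq n.toNat (pvItems Q) hR (2 ^ n.toNat) hsz, hbest]
    have hblt : pvArgm n.toNat (pvItems Q) (2 ^ n.toNat) < 2 ^ n.toNat :=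
      pvArgm_lt n.toNat (pvItems Q) (2 ^ n.toNat) hsz
    rw [hE _ hblt]
    have hres : (List.range (2 ^ n.toNat)).map
        (fun k => (pvBitstr n.toNat k, pvED n.toNat k (pvItems Q)))
        = (List.range (2 ^ n.toNat)).map (fun k => (pvBitstr n.toNat k,
            ((List.range (2 ^ n.toNat)).map
              (pvEnergyB (pvDiag (pvItems Q)) (pvAdj (pvItems Q)) n.toNat)).getD k 0)) := by
      apply List.map_congr_left
      intro k hk
      rw [hE k (List.mem_range.1 hk)]
    rw [hres]
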